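-- pv_equiv track=rewrite | github.com/nrhchnd1412/python-dsa | search/binary_search.py | find_insertion_point_after_duplicates
-- ===== SOURCE A (Python) =====
-- def find_insertion_point_after_duplicates(my_arr,target):
--     left =0
--     right = len(my_arr)-1
--     while left<=right:
--         mid = left +(right-left)//2
--         if my_arr[mid]<=target:
--             left=mid+1
--         else:
--             right=mid-1
--     return left
-- ===== SOURCE B (Python) =====
-- def find_insertion_point_after_duplicates(my_arr, target):
--     def go(lo, size):
--         if size == 0:
--             return lo
--         k = (size - 1) // 2
--         if my_arr[lo + k] <= target:
--             return go(lo + k + 1, size - 1 - k)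
--         else:
--             return go(lo, k)
--     return go(0, len(my_arr))
-- ===== Notes on version B (the rewrite author's own statement) =====
-- stated objective: alternative
-- what changed: The iterative (left,right)-bounds binary search is re-expressed as a recursion on a (lo, size) window: the state carries the window length instead of the right bound, the midpoint offset is (size-1)//2, and the recursion terminates structurally when size reaches 0; it probes the same elements and returns the same insertion index.
import Mathlib
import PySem

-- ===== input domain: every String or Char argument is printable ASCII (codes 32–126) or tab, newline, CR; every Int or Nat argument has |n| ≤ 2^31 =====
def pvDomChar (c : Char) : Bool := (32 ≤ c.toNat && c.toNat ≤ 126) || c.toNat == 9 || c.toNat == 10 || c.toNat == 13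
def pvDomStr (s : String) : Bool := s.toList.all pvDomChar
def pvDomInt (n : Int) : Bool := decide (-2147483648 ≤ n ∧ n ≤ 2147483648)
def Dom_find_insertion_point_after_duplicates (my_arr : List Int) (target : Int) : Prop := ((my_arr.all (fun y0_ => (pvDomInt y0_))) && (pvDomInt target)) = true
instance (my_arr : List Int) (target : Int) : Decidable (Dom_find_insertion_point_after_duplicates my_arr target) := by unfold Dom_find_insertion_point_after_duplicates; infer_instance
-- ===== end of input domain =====

-- B re-expresses A's iterative (left,right)-bounds binary search as a recursion on a
-- (lo, size) window whose length strictly shrinks (objective: alternative decomposition;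
-- same probes, same insertion index).

-- ===== PORT A =====
-- A's while-loop, step for step, on the loop state (left, right); the fuel length+1 is a
-- strict upper bound on the iteration count (the measure right+1-left starts at length and
-- strictly decreases), purely to make the recursion total — it never runs out.
-- my_arr[mid] is always in range on reachable states (0 ≤ left ≤ mid ≤ right < len),
-- so the pyGetD default is unreachable.
def pvWhileA (my_arr : List Int) (target : Int) : Nat → Int → Int → Int
  | 0, left, _right => left
  | fuel + 1, left, right =>
    if left ≤ right then
      let mid := left + PySem.Int.floordiv (right - left) 2
      if PySem.List.pyGetD my_arr mid 0 ≤ target then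
        pvWhileA my_arr target fuel (mid + 1) right
      else
        pvWhileA my_arr target fuel left (mid - 1)
    else left

def find_insertion_point_after_duplicates (my_arr : List Int) (target : Int) : Int :=
  pvWhileA my_arr target (my_arr.length + 1) 0 ((my_arr.length : Int) - 1)

-- ===== PORT B =====
-- B's helper go(lo, size): structural descent on the window length; my_arr[lo+k] is always
-- in range on reachable states (0 ≤ lo, lo + size ≤ len, 1 ≤ size), so pyGetD's default is unreachable.
def pvGoB (my_arr : List Int) (target : Int) (lo : Int) (size : Nat) : Int :=
  if hs : size = 0 then lo
  else
    let k := (size - 1) / 2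
    if PySem.List.pyGetD my_arr (lo + (k : Int)) 0 ≤ target then
      pvGoB my_arr target (lo + (k : Int) + 1) (size - 1 - k)
    else
      pvGoB my_arr target lo k
  termination_by size
  decreasing_by
  · omega
  · omega

def find_insertion_point_after_duplicates_alt (my_arr : List Int) (target : Int) : Int :=
  pvGoB my_arr target 0 my_arr.length

-- ===== PRECONDITION & SPEC =====
def Spec_find_insertion_point_after_duplicates (my_arr : List Int) (target : Int) (out : Int) : Prop := out = find_insertion_point_after_duplicates_alt my_arr target
instance (my_arr : List Int) (target : Int) (out : Int) : Decidable (Spec_find_insertion_point_after_duplicates my_arr target out) := by unfold Spec_find_insertion_point_after_duplicates; infer_instance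

-- ===== CLAIM (what is proved, stated in full; the proofs are below) =====
def Claim_equal_find_insertion_point_after_duplicates : Prop := ∀ (my_arr : List Int) (target : Int), Dom_find_insertion_point_after_duplicates my_arr target → Spec_find_insertion_point_after_duplicates my_arr target (find_insertion_point_after_duplicates my_arr target)

-- ===== LEMMAS AND PROOFS =====
-- A's loop state (left, right) corresponds to B's window (lo, size) via lo = left and
-- size = (right + 1 - left).toNat; both probe the same index and shrink in lockstep.
lemma pvWhileA_eq_pvGoB (my_arr : List Int) (target : Int) :
    ∀ (fuel : Nat) (l r : Int), (r + 1 - l).toNat ≤ fuel →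
      pvWhileA my_arr target fuel l r = pvGoB my_arr target l (r + 1 - l).toNat := by
  intro fuel
  induction fuel with
  | zero =>
    intro l r h
    have h0 : (r + 1 - l).toNat = 0 := by omega
    rw [h0, pvWhileA, pvGoB]
    simp
  | succ n ih =>
    intro l r h
    by_cases hlr : l ≤ r
    · have hs : (r + 1 - l).toNat ≠ 0 := by omega
      rw [pvWhileA, pvGoB, if_pos hlr, dif_neg hs]
      have hfd : PySem.Int.floordiv (r - l) 2 = ((((r + 1 - l).toNat - 1) / 2 : Nat) : Int) := by
        have h1 : r - l = ((((r + 1 - l).toNat - 1) : Nat) : Int) := by omega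
        rw [h1]
        exact_mod_cast PySem.Int.floordiv_natCast ((r + 1 - l).toNat - 1) 2
      simp only [hfd]
      by_cases hc : PySem.List.pyGetD my_arr (l + ((((r + 1 - l).toNat - 1) / 2 : Nat) : Int)) 0 ≤ target
      · rw [if_pos hc, if_pos hc]
        have hk : 2 * (((r + 1 - l).toNat - 1) / 2) ≤ (r + 1 - l).toNat - 1 := by omega
        have heq : (r + 1 - (l + ((((r + 1 - l).toNat - 1) / 2 : Nat) : Int) + 1)).toNat
            = (r + 1 - l).toNat - 1 - ((r + 1 - l).toNat - 1) / 2 := by omega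
        rw [← heq]
        exact ih (l + ((((r + 1 - l).toNat - 1) / 2 : Nat) : Int) + 1) r (by omega)
      · rw [if_neg hc, if_neg hc]
        have heq : (l + ((((r + 1 - l).toNat - 1) / 2 : Nat) : Int) - 1 + 1 - l).toNat
            = ((r + 1 - l).toNat - 1) / 2 := by omega
        have hrec := ih l (l + ((((r + 1 - l).toNat - 1) / 2 : Nat) : Int) - 1) (by omega)
        rw [heq] at hrec
        exact hrec
    · have h0 : (r + 1 - l).toNat = 0 := by omega
      rw [h0, pvWhileA, pvGoB, if_neg hlr]
      simp

-- ===== VERDICT (by name: the statement is the Claim_ definition above) =====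
theorem find_insertion_point_after_duplicates_spec : Claim_equal_find_insertion_point_after_duplicates := by
  intro my_arr target _
  unfold Spec_find_insertion_point_after_duplicates find_insertion_point_after_duplicates find_insertion_point_after_duplicates_alt
  have h := pvWhileA_eq_pvGoB my_arr target (my_arr.length + 1) 0 ((my_arr.length : Int) - 1) (by omega)
  rw [h]
  congr 1
  omega
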